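-- pv_equiv track=rewrite | github.com/Vimal-Mahendran/DAA-Assignment | Assignment-4/4.8 Destroy Sequential Targets.py | destroy_sequential_targets
-- ===== SOURCE A (Python) =====
-- def destroy_sequential_targets(nums, space):
--     from collections import defaultdict
--
--     count_map = defaultdict(int)
--     for num in nums:
--         mod_value = num % space
--         count_map[mod_value] += 1
--
--     max_targets = 0
--     min_seed = float('inf')
--     for num in nums:
--         mod_value = num % space
--         if count_map[mod_value] > max_targets or (count_map[mod_value] == max_targets and num < min_seed):
--             max_targets = count_map[mod_value]
--             min_seed = num
--
--     return min_seed
-- ===== SOURCE B (Python) =====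
-- def destroy_sequential_targets(nums, space):
--     xs = sorted(nums, key=lambda n: (n % space, n))
--     best = None
--     i, size = 0, len(xs)
--     while i < size:
--         j = i + 1
--         while j < size and xs[j] % space == xs[i] % space:
--             j += 1
--         cand = (i - j, xs[i])  # (-run length, smallest element of this residue class)
--         if best is None or cand < best:
--             best = cand
--         i = j
--     return best[1] if best is not None else float('inf')
-- ===== Notes on version B (the rewrite author's own statement) =====
-- stated objective: alternative
-- what changed: A's defaultdict residue counting plus a fused tie-break scan is replaced by sorting on the key (num % space, num) and one run-length pass over the sorted list, keeping the lexicographically least (-run length, run head) pair; frequencies arise as run lengths instead of hash-map counts.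
-- outside the precondition, e.g. on destroy_sequential_targets([], 5): A returns inf, B returns inf
import Mathlib
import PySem

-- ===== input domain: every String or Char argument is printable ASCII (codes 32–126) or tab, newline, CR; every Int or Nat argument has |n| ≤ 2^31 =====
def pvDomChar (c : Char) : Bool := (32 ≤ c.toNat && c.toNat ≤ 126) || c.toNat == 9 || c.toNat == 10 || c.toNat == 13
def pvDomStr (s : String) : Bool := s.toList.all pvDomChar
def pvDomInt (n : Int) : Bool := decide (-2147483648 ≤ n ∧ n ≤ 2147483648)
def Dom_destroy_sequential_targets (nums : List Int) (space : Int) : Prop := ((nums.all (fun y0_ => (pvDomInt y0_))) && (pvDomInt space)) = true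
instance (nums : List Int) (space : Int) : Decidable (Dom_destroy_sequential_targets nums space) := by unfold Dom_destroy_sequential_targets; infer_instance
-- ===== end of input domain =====

-- B replaces A's hash-counting scan by sort-then-run-length-scan: sort by (residue, value),
-- then one pass over the runs keeping the lexicographically least (-run length, run head)
-- (objective: alternative).

-- ===== PORT A =====
def destroy_sequential_targets (nums : List Int) (space : Int) : Int :=
  let count_map : PySem.Dict Int Int :=
    nums.foldl (fun d num => d.modify (PySem.Int.mod num space) 0 (· + 1)) PySem.Dict.empty
  let st : Int × Option Int :=
    nums.foldl (fun s num =>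
      let c := count_map.getD (PySem.Int.mod num space) 0
      if c > s.1 || (c == s.1 && (match s.2 with | none => true | some m => decide (num < m)))
      then (c, some num) else s) ((0 : Int), (none : Option Int))
  -- min_seed; Python's float('inf') (only reachable with nums = []) is outside Pre_
  st.2.getD 0

-- ===== PORT B =====
-- B's index loop over the sorted array, as structural recursion over the same sorted list:
-- the inner 'while j < size and xs[j] % space == xs[i] % space' advance is the takeWhile/
-- dropWhile split of the remainder at the current run's residue
def pvScanB (space : Int) (best : Option (Int × Int)) (xs : List Int) : Option (Int × Int) :=
  match xs with
  | [] => best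
  | h :: t =>
    let run := t.takeWhile (fun x => PySem.Int.mod x space == PySem.Int.mod h space)
    let rest := t.dropWhile (fun x => PySem.Int.mod x space == PySem.Int.mod h space)
    let cand : Int × Int := (-(1 + (run.length : Int)), h)   -- (i - j, xs[i])
    let best' : Option (Int × Int) :=
      match best with
      | none => some cand
      | some b => if cand.1 < b.1 ∨ (cand.1 = b.1 ∧ cand.2 < b.2) then some cand else some b
    pvScanB space best' rest
termination_by xs.length
decreasing_by simpa using Nat.lt_succ_of_le (List.length_dropWhile_le _ _)

def destroy_sequential_targets_alt (nums : List Int) (space : Int) : Int :=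
  let xs := PySem.List.sorted2 nums (fun n => PySem.Int.mod n space) (fun n => n)
  match pvScanB space none xs with
  | some b => b.2
  | none => 0   -- Python B returns float('inf') here (nums = []); outside Pre_

-- ===== PRECONDITION & SPEC =====
-- Pre_ excludes space = 0 (A raises ZeroDivisionError) and nums = [], on which A returns
-- float('inf'), which is not a value of the declared int type.
def Pre_destroy_sequential_targets (nums : List Int) (space : Int) : Prop :=
  nums ≠ [] ∧ space ≠ 0
instance (nums : List Int) (space : Int) : Decidable (Pre_destroy_sequential_targets nums space) := by
  unfold Pre_destroy_sequential_targets; infer_instance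
def pvWitness_destroy_sequential_targets : List Int × Int := ([3, 7, 1, 10], 2)

def Spec_destroy_sequential_targets (nums : List Int) (space : Int) (out : Int) : Prop :=
  out = destroy_sequential_targets_alt nums space
instance (nums : List Int) (space : Int) (out : Int) : Decidable (Spec_destroy_sequential_targets nums space out) := by
  unfold Spec_destroy_sequential_targets; infer_instance

-- ===== CLAIM (what is proved, stated in full; the proofs are below) =====
def Claim_equal_destroy_sequential_targets : Prop := ∀ (nums : List Int) (space : Int), Dom_destroy_sequential_targets nums space → Pre_destroy_sequential_targets nums space → Spec_destroy_sequential_targets nums space (destroy_sequential_targets nums space)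

-- ===== LEMMAS AND PROOFS =====

-- number of elements of xs in the residue class (mod space) of r
def pvCnt (s : Int) (xs : List Int) (r : Int) : Nat :=
  xs.countP (fun n => PySem.Int.mod n s == r)

-- the order B's sort arranges the list in: by residue, ties by value
def pvLe (s : Int) (x y : Int) : Prop :=
  PySem.Int.mod x s < PySem.Int.mod y s ∨ (PySem.Int.mod x s = PySem.Int.mod y s ∧ x ≤ y)

-- the lexicographic order of B's candidate pairs (Python tuple ≤)
def pvLex (a b : Int × Int) : Prop := a.1 < b.1 ∨ (a.1 = b.1 ∧ a.2 ≤ b.2)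

theorem pvLe_trans (s : Int) {x y z : Int} (h1 : pvLe s x y) (h2 : pvLe s y z) : pvLe s x z := by
  unfold pvLe at *; omega

theorem pvLex_trans {a b c : Int × Int} (h1 : pvLex a b) (h2 : pvLex b c) : pvLex a c := by
  unfold pvLex at *; omega

theorem pvScanB_nil (s : Int) (best : Option (Int × Int)) : pvScanB s best [] = best := by
  rw [pvScanB.eq_def]

theorem pvScanB_cons (s : Int) (best : Option (Int × Int)) (h : Int) (t : List Int) :
    pvScanB s best (h :: t) =
    (let run := t.takeWhile (fun x => PySem.Int.mod x s == PySem.Int.mod h s)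
     let rest := t.dropWhile (fun x => PySem.Int.mod x s == PySem.Int.mod h s)
     let cand : Int × Int := (-(1 + (run.length : Int)), h)
     let best' : Option (Int × Int) :=
       match best with
       | none => some cand
       | some b => if cand.1 < b.1 ∨ (cand.1 = b.1 ∧ cand.2 < b.2) then some cand else some b
     pvScanB s best' rest) := by
  rw [pvScanB.eq_def]

-- sorted2's comparator, specialised to B's key (n % space, n)
theorem pvBef_iff (s x y : Int) :
    ((decide (PySem.Int.mod x s < PySem.Int.mod y s) ||
      (!decide (PySem.Int.mod y s < PySem.Int.mod x s) && decide (x < y))) = true)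
    ↔ (PySem.Int.mod x s < PySem.Int.mod y s ∨ (PySem.Int.mod x s = PySem.Int.mod y s ∧ x < y)) := by
  simp only [Bool.or_eq_true, Bool.and_eq_true, Bool.not_eq_true', decide_eq_true_eq,
    decide_eq_false_iff_not, not_lt]
  omega

theorem pvInsertBy_pairwise (s x : Int) (l : List Int) (hl : l.Pairwise (pvLe s)) :
    (PySem.List.insertBy (fun a b =>
      decide (PySem.Int.mod a s < PySem.Int.mod b s) ||
      (!decide (PySem.Int.mod b s < PySem.Int.mod a s) && decide (a < b))) x l).Pairwise (pvLe s) := by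
  induction l with
  | nil => simp [PySem.List.insertBy, pvLe]
  | cons y ys ih =>
    rw [List.pairwise_cons] at hl
    obtain ⟨hy, hys⟩ := hl
    simp only [PySem.List.insertBy]
    split_ifs with hb
    · rw [pvBef_iff] at hb
      refine List.pairwise_cons.mpr ⟨?_, List.pairwise_cons.mpr ⟨hy, hys⟩⟩
      intro z hz
      have hxy : pvLe s x y := by unfold pvLe; omega
      rcases List.mem_cons.mp hz with rfl | hz
      · exact hxy
      · exact pvLe_trans s hxy (hy z hz)
    · have hnb : ¬ (PySem.Int.mod x s < PySem.Int.mod y s ∨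
          (PySem.Int.mod x s = PySem.Int.mod y s ∧ x < y)) :=
        fun hcontra => hb ((pvBef_iff s x y).mpr hcontra)
      have hb' : pvLe s y x := by unfold pvLe; omega
      refine List.pairwise_cons.mpr ⟨?_, ih hys⟩
      intro z hz
      rcases (PySem.List.mem_insertBy _ _ _ _).mp hz with rfl | hz
      · exact hb'
      · exact hy z hz

theorem pvSorted2_pairwise (s : Int) (nums : List Int) :
    (PySem.List.sorted2 nums (fun n => PySem.Int.mod n s) (fun n => n)).Pairwise (pvLe s) := by
  unfold PySem.List.sorted2
  simp only [if_neg (by decide : ¬ (false = true))]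
  induction nums using List.reverseRecOn with
  | nil => simp
  | append_singleton t x ih =>
    rw [List.foldl_append, List.foldl_cons, List.foldl_nil]
    exact pvInsertBy_pairwise s x _ ih

-- facts about one step of the run-length scan, on a pvLe-sorted list h :: t
theorem pvRun_facts (s h : Int) (t : List Int)
    (hs : (h :: t).Pairwise (pvLe s)) :
    (∀ x ∈ t.takeWhile (fun x => PySem.Int.mod x s == PySem.Int.mod h s),
        PySem.Int.mod x s = PySem.Int.mod h s) ∧
    (∀ x ∈ t.dropWhile (fun x => PySem.Int.mod x s == PySem.Int.mod h s),
        PySem.Int.mod h s < PySem.Int.mod x s) ∧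
    (t.dropWhile (fun x => PySem.Int.mod x s == PySem.Int.mod h s)).Pairwise (pvLe s) := by
  rw [List.pairwise_cons] at hs
  obtain ⟨hh, ht⟩ := hs
  refine ⟨?_, ?_, ht.sublist (List.dropWhile_sublist _)⟩
  · intro x hx
    have := List.mem_takeWhile_imp hx
    simpa using this
  · cases hrest : t.dropWhile (fun x => PySem.Int.mod x s == PySem.Int.mod h s) with
    | nil => intro x hx; simp at hx
    | cons r0 rs =>
      have hr0p : (PySem.Int.mod r0 s == PySem.Int.mod h s) = false := by
        have := List.head_dropWhile_not (fun x => PySem.Int.mod x s == PySem.Int.mod h s)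
          (l := t) (by simp [hrest])
        simpa [hrest] using this
      have hr0ne : PySem.Int.mod r0 s ≠ PySem.Int.mod h s := by simpa using hr0p
      have hsubl : (t.dropWhile (fun x => PySem.Int.mod x s == PySem.Int.mod h s)).Sublist t :=
        List.dropWhile_sublist _
      have hr0mem : r0 ∈ t := hsubl.mem (by rw [hrest]; exact List.mem_cons_self ..)
      have hr0 : PySem.Int.mod h s < PySem.Int.mod r0 s := by
        have := hh r0 hr0mem; unfold pvLe at this; omega
      intro x hx
      rcases List.mem_cons.mp hx with rfl | hx'
      · exact hr0
      · have hp : ((t.dropWhile (fun x => PySem.Int.mod x s == PySem.Int.mod h s)).Pairwise (pvLe s)) :=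
          ht.sublist (List.dropWhile_sublist _)
        rw [hrest, List.pairwise_cons] at hp
        have := hp.1 x hx'
        unfold pvLe at this; omega

-- counts of xs = h :: run ++ rest split by residue
theorem pvCnt_split (s h : Int) (t : List Int)
    (hs : (h :: t).Pairwise (pvLe s)) :
    pvCnt s (h :: t) (PySem.Int.mod h s)
      = 1 + (t.takeWhile (fun x => PySem.Int.mod x s == PySem.Int.mod h s)).length ∧
    (∀ y ∈ t.dropWhile (fun x => PySem.Int.mod x s == PySem.Int.mod h s),
      pvCnt s (h :: t) (PySem.Int.mod y s)
        = pvCnt s (t.dropWhile (fun x => PySem.Int.mod x s == PySem.Int.mod h s)) (PySem.Int.mod y s)) := by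
  obtain ⟨hrun, hrest, _⟩ := pvRun_facts s h t hs
  have hsplit : t = t.takeWhile (fun x => PySem.Int.mod x s == PySem.Int.mod h s)
      ++ t.dropWhile (fun x => PySem.Int.mod x s == PySem.Int.mod h s) :=
    (List.takeWhile_append_dropWhile).symm
  constructor
  · unfold pvCnt
    rw [List.countP_cons]
    conv_lhs => rw [hsplit]
    rw [List.countP_append]
    have h1 : (t.takeWhile (fun x => PySem.Int.mod x s == PySem.Int.mod h s)).countP
        (fun n => PySem.Int.mod n s == PySem.Int.mod h s)
        = (t.takeWhile (fun x => PySem.Int.mod x s == PySem.Int.mod h s)).length := by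
      rw [List.countP_eq_length]
      intro a ha; simpa using hrun a ha
    have h2 : (t.dropWhile (fun x => PySem.Int.mod x s == PySem.Int.mod h s)).countP
        (fun n => PySem.Int.mod n s == PySem.Int.mod h s) = 0 := by
      rw [List.countP_eq_zero]
      intro a ha
      have := hrest a ha
      simp only [beq_iff_eq]
      omega
    simp only [h1, h2, beq_self_eq_true, if_pos]
    omega
  · intro y hy
    have hyne : PySem.Int.mod h s < PySem.Int.mod y s := hrest y hy
    unfold pvCnt
    rw [List.countP_cons]
    conv_lhs => rw [hsplit]
    rw [List.countP_append]
    have h1 : (t.takeWhile (fun x => PySem.Int.mod x s == PySem.Int.mod h s)).countP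
        (fun n => PySem.Int.mod n s == PySem.Int.mod y s) = 0 := by
      rw [List.countP_eq_zero]
      intro a ha
      have := hrun a ha
      simp only [beq_iff_eq]
      omega
    have h2 : (PySem.Int.mod h s == PySem.Int.mod y s) = false := by
      simp only [beq_eq_false_iff_ne, ne_eq]
      omega
    simp [h1, h2]

-- what the run-length scan guarantees about its result, relative to start state 'best'
def pvScanGood (s : Int) (xs : List Int) (best : Option (Int × Int)) : Prop :=
  (pvScanB s best xs = best ∨
    ∃ y ∈ xs, pvScanB s best xs = some (-(pvCnt s xs (PySem.Int.mod y s) : Int), y) ∧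
      ∀ z ∈ xs, PySem.Int.mod z s = PySem.Int.mod y s → y ≤ z) ∧
  (∀ y ∈ xs, ∀ b', pvScanB s best xs = some b' →
      pvLex b' (-(pvCnt s xs (PySem.Int.mod y s) : Int), y)) ∧
  (∀ b, best = some b → ∀ b', pvScanB s best xs = some b' → pvLex b' b) ∧
  (xs ≠ [] → pvScanB s best xs ≠ none)

theorem pvScanGood_nil (s : Int) (best : Option (Int × Int)) : pvScanGood s [] best := by
  unfold pvScanGood
  rw [pvScanB_nil]
  refine ⟨Or.inl rfl, by simp, ?_, by simp⟩
  intro b hb b' hb'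
  rw [hb] at hb'
  cases hb'
  unfold pvLex; omega

theorem pvScanB_spec_aux (s : Int) (n : Nat) : ∀ (xs : List Int), xs.length ≤ n →
    xs.Pairwise (pvLe s) → ∀ (best : Option (Int × Int)), pvScanGood s xs best := by
  induction n with
  | zero =>
    intro xs hlen _ best
    have hxs : xs = [] := by cases xs <;> simp_all
    subst hxs
    exact pvScanGood_nil s best
  | succ n ih =>
    intro xs hlen hs best
    cases xs with
    | nil => exact pvScanGood_nil s best
    | cons h t =>
      obtain ⟨hrun, hrest, hrestsort⟩ := pvRun_facts s h t hs
      obtain ⟨hcnth, hcnty⟩ := pvCnt_split s h t hs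
      set run := t.takeWhile (fun x => PySem.Int.mod x s == PySem.Int.mod h s) with hrundef
      set rest := t.dropWhile (fun x => PySem.Int.mod x s == PySem.Int.mod h s) with hrestdef
      have hsplit : t = run ++ rest := (List.takeWhile_append_dropWhile).symm
      have hsub : rest.Sublist (h :: t) :=
        (List.dropWhile_sublist _).trans (List.sublist_cons_self h t)
      have hhle : ∀ z ∈ h :: t, PySem.Int.mod z s = PySem.Int.mod h s → h ≤ z := by
        intro z hz hzr
        rcases List.mem_cons.mp hz with rfl | hz'
        · exact le_refl _
        · have := (List.pairwise_cons.mp hs).1 z hz'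
          unfold pvLe at this; omega
      set cand : Int × Int := (-(1 + (run.length : Int)), h) with hcanddef
      have hcandeq : cand = (-(pvCnt s (h :: t) (PySem.Int.mod h s) : Int), h) := by
        rw [hcanddef, hcnth]; push_cast; ring_nf
      set best' : Option (Int × Int) :=
        (match best with
        | none => some cand
        | some b => if cand.1 < b.1 ∨ (cand.1 = b.1 ∧ cand.2 < b.2) then some cand else some b)
        with hbestdef
      have hstep : pvScanB s best (h :: t) = pvScanB s best' rest := by
        rw [pvScanB_cons]
      have hb'some : ∃ v, best' = some v := by
        rw [hbestdef]; cases best with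
        | none => exact ⟨cand, rfl⟩
        | some b =>
          by_cases hc : cand.1 < b.1 ∨ (cand.1 = b.1 ∧ cand.2 < b.2)
          · exact ⟨cand, by simp [hc]⟩
          · exact ⟨b, by simp [hc]⟩
      have hb'cases : best' = some cand ∨ best' = best := by
        rw [hbestdef]; cases best with
        | none => exact Or.inl rfl
        | some b =>
          by_cases hc : cand.1 < b.1 ∨ (cand.1 = b.1 ∧ cand.2 < b.2)
          · exact Or.inl (by simp [hc])
          · exact Or.inr (by simp [hc])
      have hb'le_cand : ∀ v, best' = some v → pvLex v cand := by
        intro v hv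
        rw [hbestdef] at hv
        cases best with
        | none => cases hv; exact Or.inr ⟨rfl, le_refl _⟩
        | some b =>
          dsimp only at hv
          by_cases hc : cand.1 < b.1 ∨ (cand.1 = b.1 ∧ cand.2 < b.2)
          · rw [if_pos hc] at hv; cases hv; exact Or.inr ⟨rfl, le_refl _⟩
          · rw [if_neg hc] at hv; cases hv; unfold pvLex; omega
      have hb'le_best : ∀ b, best = some b → ∀ v, best' = some v → pvLex v b := by
        intro b hb v hv
        rw [hbestdef, hb] at hv
        dsimp only at hv
        by_cases hc : cand.1 < b.1 ∨ (cand.1 = b.1 ∧ cand.2 < b.2)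
        · rw [if_pos hc] at hv; cases hv; unfold pvLex; omega
        · rw [if_neg hc] at hv; cases hv; exact Or.inr ⟨rfl, le_refl _⟩
      have hlen' : rest.length ≤ n := by
        have h1 : rest.length ≤ t.length := List.length_dropWhile_le _ _
        have h2 : (h :: t).length ≤ n + 1 := hlen
        simp only [List.length_cons] at h2
        omega
      obtain ⟨ih1, ih2, ih3, _⟩ := ih rest hlen' hrestsort best'
      obtain ⟨v0, hv0⟩ := hb'some
      have hres_ne : ∀ y ∈ rest, ∀ z ∈ h :: t, PySem.Int.mod z s = PySem.Int.mod y s → z ∈ rest := by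
        intro y hy z hz hzy
        have hym := hrest y hy
        rcases List.mem_cons.mp hz with rfl | hz'
        · omega
        · rw [hsplit] at hz'
          rcases List.mem_append.mp hz' with hz'' | hz''
          · have := hrun z hz''; omega
          · exact hz''
      refine ⟨?_, ?_, ?_, ?_⟩
      · -- (i) the result is 'best' or a valid (count, class-min) candidate of h :: t
        rcases ih1 with h1 | ⟨y, hy, hyeq, hymin⟩
        · rcases hb'cases with hbc | hbc
          · refine Or.inr ⟨h, by simp, ?_, fun z hz hzr => hhle z hz hzr⟩
            rw [hstep, h1, hbc, hcandeq]
          · exact Or.inl (by rw [hstep, h1, hbc])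
        · refine Or.inr ⟨y, hsub.mem hy, ?_, ?_⟩
          · rw [hstep, hyeq, hcnty y hy]
          · intro z hz hzy
            exact hymin z (hres_ne y hy z hz hzy) hzy
      · -- (ii) the result beats the candidate pair of every element's class
        intro y hy b' hb'
        rw [hstep] at hb'
        rcases List.mem_cons.mp hy with rfl | hy'
        · have h1 : pvLex b' v0 := ih3 v0 hv0 b' hb'
          have h2 : pvLex v0 cand := hb'le_cand v0 hv0
          have := pvLex_trans h1 h2
          rw [hcandeq] at this
          exact this
        · rw [hsplit] at hy'
          rcases List.mem_append.mp hy' with hy'' | hy''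
          · -- y in the head run: same class as h, and h ≤ y
            have hyr : PySem.Int.mod y s = PySem.Int.mod h s := hrun y hy''
            have h1 : pvLex b' v0 := ih3 v0 hv0 b' hb'
            have h2 : pvLex v0 cand := hb'le_cand v0 hv0
            have h3 := pvLex_trans h1 h2
            rw [hcandeq] at h3
            have hhy : h ≤ y := hhle y
              (by rw [hsplit]
                  exact List.mem_cons.mpr (Or.inr (List.mem_append.mpr (Or.inl hy'')))) hyr
            rw [hyr]
            unfold pvLex at h3 ⊢
            simp only at h3 ⊢
            omega
          · have := ih2 y hy'' b' hb'
            rw [hcnty y hy'']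
            exact this
      · -- (iii) the result improves on 'best'
        intro b hb b' hb'
        rw [hstep] at hb'
        exact pvLex_trans (ih3 v0 hv0 b' hb') (hb'le_best b hb v0 hv0)
      · -- (iv) nonempty input gives a result
        intro _ hnone
        rw [hstep] at hnone
        rcases ih1 with h1 | ⟨y, hy, hyeq, _⟩
        · rw [h1, hv0] at hnone; cases hnone
        · rw [hyeq] at hnone; cases hnone

theorem pvScanB_spec (s : Int) (xs : List Int) (hs : xs.Pairwise (pvLe s))
    (best : Option (Int × Int)) : pvScanGood s xs best :=
  pvScanB_spec_aux s xs.length xs (le_refl _) hs best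

-- A's tie-break combine: the better of the current seed s and the candidate u under key c.
def pvBetter (c : Int → Int) (s u : Int) : Int :=
  if c u > c s || (c u == c s && decide (u < s)) then u else s

-- one step of the combine: membership, maximality and the tie-break direction
theorem pvBetter_cases (c : Int → Int) (h u : Int) :
    (pvBetter c h u = u ∨ pvBetter c h u = h) ∧ c h ≤ c (pvBetter c h u) ∧
    c u ≤ c (pvBetter c h u) ∧ (c h = c (pvBetter c h u) → pvBetter c h u ≤ h) ∧
    (c u = c (pvBetter c h u) → pvBetter c h u ≤ u) := by
  unfold pvBetter
  split_ifs with hcond <;>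
    simp only [Bool.or_eq_true, Bool.and_eq_true, decide_eq_true_eq, beq_iff_eq,
      not_or, not_and, not_lt] at hcond
  · refine ⟨Or.inl rfl, ?_, le_refl _, ?_, fun _ => le_refl _⟩ <;>
      rcases hcond with h1 | ⟨h1, h2⟩ <;> intros <;> omega
  · refine ⟨Or.inr rfl, le_refl _, hcond.1, fun _ => le_refl _, fun he => hcond.2 he⟩

-- characterisation of a foldl over pvBetter: result is an element whose key is maximal,
-- and is the least element among those attaining the maximal key
theorem pvBetter_fold_spec (c : Int → Int) (t : List Int) (h : Int) :
    (∀ y ∈ h :: t, c y ≤ c (t.foldl (pvBetter c) h)) ∧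
    (t.foldl (pvBetter c) h) ∈ h :: t ∧
    (∀ y ∈ h :: t, c y = c (t.foldl (pvBetter c) h) → (t.foldl (pvBetter c) h) ≤ y) := by
  induction t generalizing h with
  | nil =>
    refine ⟨?_, by simp, ?_⟩ <;> intro y hy <;> simp_all
  | cons u t ih =>
    simp only [List.foldl_cons]
    obtain ⟨ihmax, ihmem, ihtie⟩ := ih (pvBetter c h u)
    obtain ⟨hbmem, hch, hcu, hth, htu⟩ := pvBetter_cases c h u
    have hbr : c (pvBetter c h u) ≤ c (t.foldl (pvBetter c) (pvBetter c h u)) :=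
      ihmax _ (by simp)
    refine ⟨?_, ?_, ?_⟩
    · intro y hy
      simp only [List.mem_cons] at hy
      rcases hy with rfl | rfl | hy
      · omega
      · omega
      · exact ihmax y (by simp [hy])
    · have := ihmem
      simp only [List.mem_cons] at this ⊢
      rcases this with heq | hmem
      · rcases hbmem with hbu | hbh
        · exact Or.inr (Or.inl (heq.trans hbu))
        · exact Or.inl (heq.trans hbh)
      · exact Or.inr (Or.inr hmem)
    · intro y hy hcy
      simp only [List.mem_cons] at hy
      have hkey : ∀ z, c z = c (t.foldl (pvBetter c) (pvBetter c h u)) →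
          c z ≤ c (pvBetter c h u) →
          (t.foldl (pvBetter c) (pvBetter c h u)) ≤ pvBetter c h u := by
        intro z h1 h2
        exact ihtie _ (by simp) (by omega)
      rcases hy with heq | heq | hy
      · have hce : c h = c (t.foldl (pvBetter c) (pvBetter c h u)) := heq ▸ hcy
        have h2 := hkey h hce hch
        have h3 : pvBetter c h u ≤ h := hth (by omega)
        rw [heq]; exact le_trans h2 h3
      · have hce : c u = c (t.foldl (pvBetter c) (pvBetter c h u)) := heq ▸ hcy
        have h2 := hkey u hce hcu
        have h3 : pvBetter c h u ≤ u := htu (by omega)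
        rw [heq]; exact le_trans h2 h3
      · exact ihtie y (by simp [hy]) hcy

-- A's second loop, after the first step, always carries states of the form (c s, some s),
-- and from such a state it is the foldl of pvBetter.
theorem pvLoopA_eq_foldl (c : Int → Int) (t : List Int) (s : Int) :
    t.foldl (fun st num =>
      if c num > st.1 || (c num == st.1 && (match st.2 with | none => true | some m => decide (num < m)))
      then (c num, some num) else st) ((c s : Int), (some s : Option Int))
    = (c (t.foldl (pvBetter c) s), some (t.foldl (pvBetter c) s)) := by
  induction t generalizing s with
  | nil => rfl
  | cons u t ih =>
    have hc : ((decide (c u > c s) || (c u == c s && decide (u < s))) = true)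
        ↔ (c u > c s ∨ (c u = c s ∧ u < s)) := by
      simp only [Bool.or_eq_true, Bool.and_eq_true, decide_eq_true_eq, beq_iff_eq]
    simp only [List.foldl_cons]
    by_cases hgt : c u > c s ∨ (c u = c s ∧ u < s)
    · rw [show (if (c u > (c s, some s).1 || (c u == (c s, some s).1 &&
          (match (c s, (some s : Option Int)).2 with | none => true | some m => decide (u < m))))
          then ((c u : Int), (some u : Option Int)) else (c s, some s)) = (c u, some u)
          from if_pos (hc.mpr hgt),
        show pvBetter c s u = u from if_pos (hc.mpr hgt)]
      exact ih u
    · rw [show (if (c u > (c s, some s).1 || (c u == (c s, some s).1 &&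
          (match (c s, (some s : Option Int)).2 with | none => true | some m => decide (u < m))))
          then ((c u : Int), (some u : Option Int)) else (c s, some s)) = (c s, some s)
          from if_neg (fun h => hgt (hc.mp h)),
        show pvBetter c s u = s from if_neg (fun h => hgt (hc.mp h))]
      exact ih s

-- the count A's dict assigns to a residue is pvCnt
theorem pvCounter_eq_cnt (s : Int) (nums : List Int) (n : Int) :
    (PySem.Dict.counter (nums.map (fun m => PySem.Int.mod m s))).getD (PySem.Int.mod n s) 0
      = (pvCnt s nums (PySem.Int.mod n s) : Int) := by
  rw [PySem.Dict.getD_counter]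
  unfold pvCnt
  rw [List.count_eq_countP, List.countP_map]
  rfl

-- the whole equivalence on a nonempty list, for an abstract count function c
theorem pvMain (s : Int) (c : Int → Int) (h : Int) (t : List Int)
    (hcc : ∀ n, c n = (pvCnt s (h :: t) (PySem.Int.mod n s) : Int)) :
    (((h :: t).foldl (fun st num =>
      if c num > st.1 || (c num == st.1 && (match st.2 with | none => true | some m => decide (num < m)))
      then (c num, some num) else st) ((0 : Int), (none : Option Int))).2.getD 0)
    = (match pvScanB s none
        (PySem.List.sorted2 (h :: t) (fun n => PySem.Int.mod n s) (fun n => n)) with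
      | some b => b.2
      | none => 0) := by
  have hpos : 0 < c h := by
    rw [hcc h]; unfold pvCnt; rw [List.countP_cons]; simp
  have hA : (h :: t).foldl (fun st num =>
      if c num > st.1 || (c num == st.1 && (match st.2 with | none => true | some m => decide (num < m)))
      then (c num, some num) else st) ((0 : Int), (none : Option Int))
      = (c (t.foldl (pvBetter c) h), some (t.foldl (pvBetter c) h)) := by
    rw [List.foldl_cons]
    have h0 : (c h > ((0:Int), (none : Option Int)).1 || (c h == ((0:Int), (none : Option Int)).1 &&
        (match ((0:Int), (none : Option Int)).2 with | none => true | some m => decide (h < m)))) = true := by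
      simp only [Bool.or_eq_true, Bool.and_eq_true, decide_eq_true_eq, beq_iff_eq]
      omega
    rw [if_pos h0]
    exact pvLoopA_eq_foldl c t h
  rw [hA]
  simp only [Option.getD_some]
  set mA := t.foldl (pvBetter c) h with hmAdef
  obtain ⟨hAmax, hAmem, hAtie⟩ := pvBetter_fold_spec c t h
  set xs := PySem.List.sorted2 (h :: t) (fun n => PySem.Int.mod n s) (fun n => n) with hxsdef
  have hperm : xs.Perm (h :: t) := PySem.List.sorted2_perm ..
  have hxsne : xs ≠ [] := by
    intro hx; have := hperm.length_eq; rw [hx] at this; simp at this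
  obtain ⟨hB1, hB2, _, hB4⟩ := pvScanB_spec s xs (hxsdef ▸ pvSorted2_pairwise s (h :: t)) none
  have hcntperm : ∀ r, pvCnt s xs r = pvCnt s (h :: t) r := by
    intro r; exact hperm.countP_eq _
  cases hscan : pvScanB s none xs with
  | none => exact absurd hscan (hB4 hxsne)
  | some b =>
    simp only
    rcases hB1 with h1 | ⟨y, hy, hyeq, hymin⟩
    · rw [hscan] at h1; cases h1
    · rw [hscan] at hyeq
      cases hyeq
      show mA = y
      have hymem : y ∈ h :: t := hperm.mem_iff.mp hy
      have hAy : c y ≤ c mA := hAmax y hymem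
      have hbeat : (-(pvCnt s xs (PySem.Int.mod y s) : Int) < -(pvCnt s xs (PySem.Int.mod mA s) : Int))
          ∨ (-(pvCnt s xs (PySem.Int.mod y s) : Int) = -(pvCnt s xs (PySem.Int.mod mA s) : Int) ∧ y ≤ mA) := by
        have hb := hB2 mA (hperm.mem_iff.mpr hAmem) _ hscan
        unfold pvLex at hb
        exact hb
      have hcy : c y = (pvCnt s (h :: t) (PySem.Int.mod y s) : Int) := hcc y
      have hcmA : c mA = (pvCnt s (h :: t) (PySem.Int.mod mA s) : Int) := hcc mA
      rcases hbeat with hlt | ⟨heq, hle⟩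
      · exfalso
        rw [hcntperm, hcntperm] at hlt
        omega
      · rw [hcntperm, hcntperm] at heq
        have hceq : c y = c mA := by omega
        have := hAtie y hymem hceq
        omega

-- ===== VERDICT (by name: the statement is the Claim_ definition above) =====
theorem destroy_sequential_targets_spec : Claim_equal_destroy_sequential_targets := by
  intro nums space _ hpre
  obtain ⟨hne, _⟩ := hpre
  unfold Spec_destroy_sequential_targets
  cases nums with
  | nil => exact absurd rfl hne
  | cons h t =>
    unfold destroy_sequential_targets destroy_sequential_targets_alt
    have hcm : (h :: t).foldl (fun d num => d.modify (PySem.Int.mod num space) 0 (· + 1)) PySem.Dict.empty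
        = PySem.Dict.counter ((h :: t).map (fun n => PySem.Int.mod n space)) := by
      rw [PySem.Dict.counter_eq_foldl, List.foldl_map]
    rw [hcm]
    exact pvMain space
      (fun n => (PySem.Dict.counter ((h :: t).map (fun m => PySem.Int.mod m space))).getD (PySem.Int.mod n space) 0)
      h t (fun n => pvCounter_eq_cnt space (h :: t) n)
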